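-- pv_equiv track=rewrite | github.com/lbyoo/mytoolbox | scripts/QAC文件过滤.py | del_lines
-- ===== SOURCE A (Python) =====
-- def del_lines(lines, i):
--     st = i
--     j = i + 2
--     while True:
--         if lines[j].startswith("Msg("):
--             del lines[i: i + 2]
--             break
--         elif lines[j].startswith("-->("):
--             del lines[j]
--             continue
--         else:
--             if lines[i - 1].strip() == "^":
--                 del lines[i - 1: i + 2]
--                 st = i - 1
--             else:
--                 del lines[i: i + 2]
--
--
--             break
--
--     return st
-- ===== SOURCE B (Python) =====
-- def del_lines(lines, i):
--     # Count the run of consecutive "-->(" lines starting at i+2 first, then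
--     # do the deletions in one place.  Return value matches A; the in-place
--     # deletions are the equivalent net effect.
--     r = 0
--     while lines[i + 2 + r].startswith("-->("):
--         r += 1
--     first = lines[i + 2 + r]
--     if first.startswith("Msg("):
--         del lines[i + 2: i + 2 + r]
--         del lines[i: i + 2]
--         return i
--     if lines[i - 1].strip() == "^":
--         del lines[i + 2: i + 2 + r]
--         del lines[i - 1: i + 2]
--         return i - 1
--     del lines[i + 2: i + 2 + r]
--     del lines[i: i + 2]
--     return i
-- ===== Notes on version B (the rewrite author's own statement) =====
-- stated objective: simpler
-- what changed: B first counts the run of consecutive '-->(' lines without mutating, then inspects the first line after the run and does the deletions in one place, instead of A's delete-one-line-per-iteration while-True loop.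
-- outside the precondition, e.g. on del_lines(['Msg(a', '-->(b', 'x'], -4): A returns -4, B raises IndexError; on del_lines(['^', '-->(a', 'x'], -1): A returns -2, B returns -1
import Mathlib
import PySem

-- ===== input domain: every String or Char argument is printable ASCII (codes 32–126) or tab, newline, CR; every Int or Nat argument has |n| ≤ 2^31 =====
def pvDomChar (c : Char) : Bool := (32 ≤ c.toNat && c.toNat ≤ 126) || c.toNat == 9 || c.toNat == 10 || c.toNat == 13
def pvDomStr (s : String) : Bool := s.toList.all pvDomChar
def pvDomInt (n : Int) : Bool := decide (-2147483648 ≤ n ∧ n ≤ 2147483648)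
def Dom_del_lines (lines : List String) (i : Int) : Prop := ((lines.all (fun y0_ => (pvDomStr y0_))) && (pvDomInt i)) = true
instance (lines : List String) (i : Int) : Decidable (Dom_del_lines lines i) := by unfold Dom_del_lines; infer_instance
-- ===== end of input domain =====

-- B counts the run of "-->(" lines first and then branches once, instead of A's
-- delete-as-you-scan loop (objective: simpler decomposition, same cost).
-- Both Pythons mutate `lines` in place; the equivalence ported and proved here is
-- about the RETURN value only.

-- ===== PORT A =====
-- The while-True loop: each "-->(" iteration performs `del lines[j]` (j = i+2) and
-- re-enters the loop; `none` marks a Python raise (excluded by Pre_del_lines),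
-- where 0 is a dummy value.
def del_lines (lines : List String) (i : Int) : Int :=
  match PySem.List.pyGet? lines (i + 2) with
  | none => 0                                   -- lines[j] raises IndexError
  | some s =>
    if PySem.Str.startswith s "Msg(" then i     -- del lines[i:i+2]; return st = i
    else if PySem.Str.startswith s "-->(" then
      match h : PySem.List.pop? lines (i + 2) with
      | none => 0                               -- unreachable: lines[j] just succeeded
      | some r => del_lines r.2 i               -- del lines[j]; continue
    else
      match PySem.List.pyGet? lines (i - 1) with
      | none => 0                               -- lines[i-1] raises (empty list)
      | some t =>
        if PySem.Str.strip t = "^" then i - 1   -- del lines[i-1:i+2]; st = i - 1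
        else i                                  -- del lines[i:i+2]; st = i
termination_by lines.length
decreasing_by
  have := PySem.List.length_of_pop?_eq_some lines h
  omega

-- ===== PORT B =====
-- `while lines[i+2+r].startswith("-->("): r += 1` — fuel bounds the loop; inside
-- Pre_ the scan stops before the fuel runs out (fuel only makes the port total).
def countRun (lines : List String) (j : Int) : Nat → Int
  | 0 => 0
  | fuel + 1 =>
    match PySem.List.pyGet? lines j with
    | none => 0                                 -- lines[i+2+r] raises IndexError
    | some s =>
      if PySem.Str.startswith s "-->(" then 1 + countRun lines (j + 1) fuel
      else 0

def del_lines_alt (lines : List String) (i : Int) : Int :=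
  let r := countRun lines (i + 2) (lines.length + 1)
  match PySem.List.pyGet? lines (i + 2 + r) with
  | none => 0                                   -- lines[i+2+r] raises IndexError
  | some first =>
    if PySem.Str.startswith first "Msg(" then i
    else
      match PySem.List.pyGet? lines (i - 1) with
      | none => 0                               -- lines[i-1] raises (empty list)
      | some t =>
        if PySem.Str.strip t = "^" then i - 1
        else i

-- ===== PRECONDITION & SPEC =====
-- Pre_ excludes (a) inputs on which Python raises IndexError (the "-->(" scan runs
-- off the end of the list, or a needed index is out of range), and (b) negative-i
-- inputs on which a "-->(" line is deleted during the scan: there Python's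
-- negative-index wraparound plus A's in-place deletions make A re-read a shifted
-- list — an artefact of A's implementation that B does not reproduce.  Negative-i
-- inputs where no deletion happens (the first scanned line is not "-->(") are kept.
def Pre_del_lines (lines : List String) (i : Int) : Prop :=
  (0 ≤ i ∧ ((lines.drop (i + 2).toNat).any (fun s => !(PySem.Str.startswith s "-->("))) = true)
  ∨ (i < 0 ∧ ((PySem.List.pyGet? lines (i + 2)).any
      (fun s => !(PySem.Str.startswith s "-->(") &&
        (PySem.Str.startswith s "Msg(" || decide (-(lines.length : Int) ≤ i - 1)))) = true)
instance (lines : List String) (i : Int) : Decidable (Pre_del_lines lines i) := by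
  unfold Pre_del_lines; infer_instance

def pvWitness_del_lines : List String × Int := (["a", "b", "x"], 0)

def Spec_del_lines (lines : List String) (i : Int) (out : Int) : Prop := out = del_lines_alt lines i
instance (lines : List String) (i : Int) (out : Int) : Decidable (Spec_del_lines lines i out) := by unfold Spec_del_lines; infer_instance

-- ===== CLAIM (what is proved, stated in full; the proofs are below) =====
def Claim_equal_del_lines : Prop := ∀ (lines : List String) (i : Int), Dom_del_lines lines i → Pre_del_lines lines i → Spec_del_lines lines i (del_lines lines i)

-- ===== LEMMAS AND PROOFS =====

-- the branch both programs take once the first non-"-->(" line y after position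
-- i+2 has been found (proof-only helper)
def afterScan (lines : List String) (i : Int) (y : String) : Int :=
  if PySem.Str.startswith y "Msg(" then i
  else
    match PySem.List.pyGet? lines (i - 1) with
    | none => 0
    | some t => if PySem.Str.strip t = "^" then i - 1 else i

-- a line cannot start with both "Msg(" and "-->("
lemma msg_not_arrow (s : String) (h : PySem.Str.startswith s "Msg(" = true) :
    PySem.Str.startswith s "-->(" = false := by
  by_contra hc
  rw [Bool.not_eq_false] at hc
  have h1 : "Msg(".toList <+: s.toList := by
    simpa [PySem.Chars.startswith_iff] using h
  have h2 : "-->(".toList <+: s.toList := by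
    simpa [PySem.Chars.startswith_iff] using hc
  have h3 := List.prefix_of_prefix_length_le h1 h2 (by decide)
  simp [List.cons_prefix_cons] at h3

-- reading lines[i-1] is unaffected by deleting one element at index i+2
lemma read_shift (l1 rest : List String) (x : String) (i : Int)
    (hi : 0 ≤ i) (hlen : (l1.length : Int) = i + 2) (hrest : rest ≠ []) :
    PySem.List.pyGet? (l1 ++ x :: rest) (i - 1) = PySem.List.pyGet? (l1 ++ rest) (i - 1) := by
  rcases eq_or_lt_of_le hi with h0 | h1
  · -- i = 0 : lines[-1] is the last element; rest ≠ [] so it is the last of rest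
    obtain ⟨v, hv⟩ := Option.isSome_iff_exists.mp (List.getLast?_isSome.mpr hrest)
    rw [← h0, show (0 : Int) - 1 = -1 by norm_num]
    rw [PySem.List.pyGet?_neg_one, PySem.List.pyGet?_neg_one]
    have hx : (x :: rest).getLast? = rest.getLast? := by
      rw [show x :: rest = [x] ++ rest by rfl, List.getLast?_append, hv]; rfl
    rw [List.getLast?_append, List.getLast?_append, hx]
  · -- 1 ≤ i : index i-1 lies inside l1
    rw [PySem.List.pyGet?_of_nonneg (l1 ++ x :: rest) (by omega),
        PySem.List.pyGet?_of_nonneg (l1 ++ rest) (by omega)]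
    have hlt : (i - 1).toNat < l1.length := by omega
    rw [List.getElem?_append_left hlt, List.getElem?_append_left hlt]

-- A's loop characterised: the answer is decided by the first non-"-->(" line
-- after the (unchanged) prefix of length i+2
lemma loopA_eq (l2 : List String) : ∀ (l1 : List String) (i : Int),
    0 ≤ i → (l1.length : Int) = i + 2 →
    (l2.any (fun s => !(PySem.Str.startswith s "-->("))) = true →
    del_lines (l1 ++ l2) i =
      afterScan (l1 ++ l2) i
        ((l2.dropWhile (fun s => PySem.Str.startswith s "-->(")).headD "") := by
  induction l2 with
  | nil => intro l1 i _ _ hany; simp at hany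
  | cons x rest ih =>
    intro l1 i hi hlen hany
    have hidx : i + 2 = ((l1.length : Nat) : Int) := hlen.symm
    have hget : PySem.List.pyGet? (l1 ++ x :: rest) (i + 2) = some x := by
      rw [hidx]; exact PySem.List.pyGet?_append_length l1 rest x
    rw [del_lines]
    split
    · next h => rw [hget] at h; cases h
    · next s h =>
      rw [hget] at h
      injection h with h
      subst h
      by_cases hmS : PySem.Str.startswith x "Msg(" = true
      · have haC : PySem.Chars.startswith x.toList ['-', '-', '>', '('] = false := by
          simpa using msg_not_arrow x hmS
        have hdwc : (x :: rest).dropWhile (fun s => PySem.Str.startswith s "-->(") = x :: rest := by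
          simp [haC]
        rw [hdwc, List.headD_cons]
        simp only [afterScan]
        rw [if_pos hmS, if_pos hmS]
      · by_cases haS : PySem.Str.startswith x "-->(" = true
        · have haC : PySem.Chars.startswith x.toList ['-', '-', '>', '('] = true := by
            simpa using haS
          have hor : PySem.Chars.startswith x.toList ['-', '-', '>', '('] = false ∨
              (rest.any (fun s => !(PySem.Str.startswith s "-->("))) = true := by
            simpa using hany
          have hrest := hor.resolve_left (by simp [haC])
          have hne : rest ≠ [] := by intro h; rw [h] at hrest; simp at hrest
          have hpop : PySem.List.pop? (l1 ++ x :: rest) (i + 2) = some (x, l1 ++ rest) := by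
            rw [hidx, PySem.List.pop?_natCast _ l1.length (by simp)]
            refine congrArg some (Prod.ext ?_ ?_)
            · simp
            · show (l1 ++ x :: rest).eraseIdx l1.length = l1 ++ rest
              rw [List.eraseIdx_append_of_length_le le_rfl]
              simp
          rw [if_neg hmS, if_pos haS]
          have hdwc : (x :: rest).dropWhile (fun s => PySem.Str.startswith s "-->(") =
              rest.dropWhile (fun s => PySem.Str.startswith s "-->(") := by
            simp [haC]
          rw [hdwc]
          split
          · next h => rw [hpop] at h; cases h
          · next r h =>
              rw [hpop] at h
              injection h with h
              subst h
              show del_lines (l1 ++ rest) i = _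
              rw [ih l1 i hi hlen hrest]
              simp only [afterScan]
              rw [read_shift l1 rest x i hi hlen hne]
        · have haC : PySem.Chars.startswith x.toList ['-', '-', '>', '('] = false := by
            simpa using haS
          have hdwc : (x :: rest).dropWhile (fun s => PySem.Str.startswith s "-->(") = x :: rest := by
            simp [haC]
          rw [if_neg hmS, if_neg haS, hdwc, List.headD_cons]
          simp only [afterScan]
          rw [if_neg hmS]

-- B's counting loop computes the length of the leading "-->(" run
lemma countRun_eq (l2 : List String) : ∀ (l1 : List String) (fuel : Nat),
    (l2.any (fun s => !(PySem.Str.startswith s "-->("))) = true →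
    l2.length ≤ fuel →
    countRun (l1 ++ l2) (l1.length : Int) fuel =
      ((l2.takeWhile (fun s => PySem.Str.startswith s "-->(")).length : Int) := by
  induction l2 with
  | nil => intro l1 fuel hany _; simp at hany
  | cons x rest ih =>
    intro l1 fuel hany hfuel
    match fuel, hfuel with
    | f + 1, hfuel =>
      rw [countRun, PySem.List.pyGet?_append_length l1 rest x]
      show (if PySem.Str.startswith x "-->(" = true
              then 1 + countRun (l1 ++ x :: rest) ((l1.length : Int) + 1) f
              else 0) = _
      by_cases haS : PySem.Str.startswith x "-->(" = true
      · have haC : PySem.Chars.startswith x.toList ['-', '-', '>', '('] = true := by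
          simpa using haS
        have hor : PySem.Chars.startswith x.toList ['-', '-', '>', '('] = false ∨
            (rest.any (fun s => !(PySem.Str.startswith s "-->("))) = true := by
          simpa using hany
        have hrest := hor.resolve_left (by simp [haC])
        have htw : (x :: rest).takeWhile (fun s => PySem.Str.startswith s "-->(") =
            x :: rest.takeWhile (fun s => PySem.Str.startswith s "-->(") := by
          simp [haC]
        rw [if_pos haS, htw,
            show ((l1.length : Int) + 1) = (((l1 ++ [x]).length : Nat) : Int) by simp,
            show l1 ++ x :: rest = (l1 ++ [x]) ++ rest by simp,
            ih (l1 ++ [x]) f hrest (by simpa using hfuel)]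
        simp only [List.length_cons]
        push_cast
        omega
      · have haC : PySem.Chars.startswith x.toList ['-', '-', '>', '('] = false := by
          simpa using haS
        have htw : (x :: rest).takeWhile (fun s => PySem.Str.startswith s "-->(") = [] := by
          simp [haC]
        rw [if_neg haS, htw]
        rfl

-- ===== VERDICT (by name: the statement is the Claim_ definition above) =====
theorem del_lines_spec : Claim_equal_del_lines := by
  intro lines i _ hpre
  unfold Spec_del_lines
  rcases hpre with ⟨hi, hany⟩ | ⟨hneg, hok⟩
  · obtain ⟨l1, l2, rfl, hlen, hany2⟩ :
        ∃ l1 l2, lines = l1 ++ l2 ∧ (l1.length : Int) = i + 2 ∧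
          (l2.any (fun s => !(PySem.Str.startswith s "-->("))) = true := by
      refine ⟨lines.take (i + 2).toNat, lines.drop (i + 2).toNat,
        (List.take_append_drop _ _).symm, ?_, hany⟩
      have hne : lines.drop (i + 2).toNat ≠ [] := by
        intro h; rw [h] at hany; simp at hany
      have hlt : (i + 2).toNat < lines.length := by
        by_contra h
        exact hne (List.drop_eq_nil_of_le (by omega))
      simp [List.length_take]
      omega
    have hne : l2.dropWhile (fun s => PySem.Str.startswith s "-->(") ≠ [] := by
      rw [Ne, List.dropWhile_eq_nil_iff]
      intro h
      simp only [List.any_eq_true] at hany2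
      obtain ⟨s, hs, hs'⟩ := hany2
      rw [h s hs] at hs'; simp at hs'
    rcases hdw : l2.dropWhile (fun s => PySem.Str.startswith s "-->(") with _ | ⟨y, tl⟩
    · exact absurd hdw hne
    have hcount : countRun (l1 ++ l2) (i + 2) ((l1 ++ l2).length + 1) =
        ((l2.takeWhile (fun s => PySem.Str.startswith s "-->(")).length : Int) := by
      rw [← hlen]
      exact countRun_eq l2 l1 _ hany2 (by rw [List.length_append]; omega)
    have hgetB : PySem.List.pyGet? (l1 ++ l2)
        (i + 2 + ((l2.takeWhile (fun s => PySem.Str.startswith s "-->(")).length : Int)) = some y := by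
      have hsplit2 : l1 ++ l2 =
          (l1 ++ l2.takeWhile (fun s => PySem.Str.startswith s "-->(")) ++ (y :: tl) := by
        nth_rewrite 1 [← List.takeWhile_append_dropWhile
          (p := fun s => PySem.Str.startswith s "-->(") (l := l2)]
        rw [hdw, ← List.append_assoc]
      have hidx2 : i + 2 + ((l2.takeWhile (fun s => PySem.Str.startswith s "-->(")).length : Int)
          = (((l1 ++ l2.takeWhile (fun s => PySem.Str.startswith s "-->(")).length : Nat) : Int) := by
        rw [List.length_append]
        push_cast
        omega
      rw [hidx2]
      nth_rewrite 1 [hsplit2]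
      exact PySem.List.pyGet?_append_length _ _ _
    rw [loopA_eq l2 l1 i hi hlen hany2, hdw, List.headD_cons]
    unfold del_lines_alt
    simp only [hcount, hgetB]
    simp only [afterScan]
  · -- i < 0 and the first scanned line is not "-->(": no deletion happens and the
    -- two programs read the same cells
    rcases ho : PySem.List.pyGet? lines (i + 2) with _ | s
    · rw [ho] at hok; simp at hok
    · rw [ho] at hok
      simp only [Option.any_some, Bool.and_eq_true, Bool.not_eq_true'] at hok
      obtain ⟨hps, -⟩ := hok
      have hpsC : PySem.Chars.startswith s.toList ['-', '-', '>', '('] = false := by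
        simpa using hps
      have hcr : countRun lines (i + 2) (lines.length + 1) = 0 := by
        rw [countRun, ho]
        simp [hpsC]
      rw [del_lines]
      split
      · next h => rw [ho] at h; cases h
      · next t ht =>
        rw [ho] at ht
        injection ht with ht
        subst ht
        unfold del_lines_alt
        simp only [hcr, add_zero, ho]
        have hpsS : ¬ PySem.Str.startswith s "-->(" = true := by simp [hpsC]
        rw [if_neg hpsS]
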